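-- pv_equiv track=rewrite | github.com/stefanoandroni/advent-of-code | 2023/day-3/part-2/main.py | get_ajdacent_asterisks
-- ===== SOURCE A (Python) =====
-- COORDINATES = [(1, 0), (0, 1), (-1, 0), (0, -1), (1, 1), (-1, -1), (1, -1), (-1, 1)]
--
-- def get_ajdacent_asterisks(number, A):
--     n, coord  = number
--     xn, yn = coord
--     out = []
--     for xs, ys in A:
--         for xc, yc in COORDINATES:
--             xsc = xs + xc
--             ysc = ys + yc
--             for i in range(len(str(n))):
--                 #if (is_within_matrix((x,y)):) # TODO: Check if in matrix limits
--                 if (xsc, ysc) == (xn + i, yn):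
--                     out.append((xs, ys))
--     return out
-- ===== SOURCE B (Python) =====
-- def get_ajdacent_asterisks(number, A):
--     n, (xn, yn) = number
--     cells = [(xn + i, yn) for i in range(len(str(n)))]
--     out = []
--     for xs, ys in A:
--         for dx, dy in cells:
--             if (xs, ys) != (dx, dy) and abs(xs - dx) <= 1 and abs(ys - dy) <= 1:
--                 out.append((xs, ys))
--     return out
-- ===== Notes on version B (the rewrite author's own statement) =====
-- stated objective: simpler
-- what changed: B precomputes the number's digit-cell list once and, per asterisk, appends it for each cell within Chebyshev distance 1 (excluding the cell itself), replacing A's triple loop over the 8 fixed offsets with a single per-cell adjacency test.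
import Mathlib
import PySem

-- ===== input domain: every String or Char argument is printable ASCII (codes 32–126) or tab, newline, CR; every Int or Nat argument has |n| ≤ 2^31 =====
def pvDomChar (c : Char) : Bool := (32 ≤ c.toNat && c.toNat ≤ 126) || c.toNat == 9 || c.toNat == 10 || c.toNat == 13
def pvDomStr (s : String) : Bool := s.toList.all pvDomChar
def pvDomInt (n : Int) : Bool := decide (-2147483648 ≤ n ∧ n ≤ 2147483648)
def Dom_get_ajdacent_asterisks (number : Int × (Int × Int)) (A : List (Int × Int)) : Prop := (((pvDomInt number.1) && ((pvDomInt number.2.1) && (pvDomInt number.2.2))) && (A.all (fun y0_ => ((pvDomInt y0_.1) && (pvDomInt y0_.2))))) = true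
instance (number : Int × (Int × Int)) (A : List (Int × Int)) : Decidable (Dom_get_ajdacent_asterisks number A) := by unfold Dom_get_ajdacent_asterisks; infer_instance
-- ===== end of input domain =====

-- B replaces A's 8-offset enumeration with a per-digit-cell Chebyshev-adjacency test (objective: simpler; same return value).

-- ===== PORT A =====
def pvCOORDINATES : List (Int × Int) := [(1, 0), (0, 1), (-1, 0), (0, -1), (1, 1), (-1, -1), (1, -1), (-1, 1)]

def get_ajdacent_asterisks (number : Int × (Int × Int)) (A : List (Int × Int)) : List (Int × Int) :=
  let n := number.1
  let xn := number.2.1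
  let yn := number.2.2
  A.foldl (fun out s =>
    pvCOORDINATES.foldl (fun out c =>
      (PySem.List.pyRange 0 (PySem.Str.len (PySem.Int.toStr n)) 1).foldl (fun out i =>
        if (s.1 + c.1, s.2 + c.2) = (xn + i, yn) then out ++ [s] else out) out) out) []

-- ===== PORT B =====
def get_ajdacent_asterisks_alt (number : Int × (Int × Int)) (A : List (Int × Int)) : List (Int × Int) :=
  let n := number.1
  let xn := number.2.1
  let yn := number.2.2
  let cells := (PySem.List.pyRange 0 (PySem.Str.len (PySem.Int.toStr n)) 1).map (fun i => (xn + i, yn))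
  A.foldl (fun out s =>
    cells.foldl (fun out d =>
      if s ≠ d ∧ (s.1 - d.1).natAbs ≤ 1 ∧ (s.2 - d.2).natAbs ≤ 1 then out ++ [s] else out) out) []

-- ===== PRECONDITION & SPEC =====
def Spec_get_ajdacent_asterisks (number : Int × (Int × Int)) (A : List (Int × Int)) (out : List (Int × Int)) : Prop := out = get_ajdacent_asterisks_alt number A
instance (number : Int × (Int × Int)) (A : List (Int × Int)) (out : List (Int × Int)) : Decidable (Spec_get_ajdacent_asterisks number A out) := by unfold Spec_get_ajdacent_asterisks; infer_instance

-- ===== CLAIM (what is proved, stated in full; the proofs are below) =====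
def Claim_equal_get_ajdacent_asterisks : Prop := ∀ (number : Int × (Int × Int)) (A : List (Int × Int)), Dom_get_ajdacent_asterisks number A → Spec_get_ajdacent_asterisks number A (get_ajdacent_asterisks number A)

-- ===== LEMMAS AND PROOFS =====

-- a conditional-append fold emits replicate-many copies of s
theorem pv_foldl_if_rep {α β : Type} (p : β → Prop) [DecidablePred p] (s : α) :
    ∀ (l : List β) (out : List α),
      l.foldl (fun out x => if p x then out ++ [s] else out) out
        = out ++ List.replicate (l.countP fun x => decide (p x)) s := by
  intro l
  induction l with
  | nil => intro out; simp
  | cons a l ih =>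
      intro out
      by_cases h : p a
      · simp [List.foldl_cons, ih, h]
        rw [List.replicate_succ]
      · simp [List.foldl_cons, ih, h]

-- folding replicate-appends concatenates into one replicate of the total count
theorem pv_foldl_rep_sum {α β : Type} (f : β → Nat) (s : α) :
    ∀ (l : List β) (out : List α),
      l.foldl (fun out c => out ++ List.replicate (f c) s) out
        = out ++ List.replicate ((l.map f).sum) s := by
  intro l
  induction l with
  | nil => intro out; simp
  | cons a l ih =>
      intro out
      rw [List.foldl_cons, ih, List.map_cons, List.sum_cons, List.replicate_add, List.append_assoc]

-- a 0/1 sum is a count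
theorem pv_sum_ind {β : Type} (p : β → Prop) [DecidablePred p] :
    ∀ (l : List β), (l.map (fun b => if p b then 1 else 0)).sum = l.countP (fun b => decide (p b)) := by
  intro l
  induction l with
  | nil => simp
  | cons a l ih => by_cases h : p a <;> simp [h, ih, Nat.add_comm]

-- exchanging the two counting loops
theorem pv_count_swap {β γ : Type} (p : β → γ → Prop) [∀ a b, Decidable (p a b)] :
    ∀ (l2 : List γ) (l1 : List β),
      (l1.map (fun a => l2.countP (fun b => decide (p a b)))).sum
        = (l2.map (fun b => l1.countP (fun a => decide (p a b)))).sum := by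
  intro l2
  induction l2 with
  | nil => intro l1; simp
  | cons b l2 ih =>
      intro l1
      have : (l1.map (fun a => (b :: l2).countP (fun b' => decide (p a b')))).sum
          = (l1.map (fun a => (if p a b then 1 else 0) + l2.countP (fun b' => decide (p a b')))).sum := by
        apply congrArg
        apply List.map_congr_left
        intro a _
        simp [List.countP_cons, Nat.add_comm]
      rw [this, List.sum_map_add, pv_sum_ind, ih]
      simp

-- the number of coordinate offsets hitting a fixed cell is the Chebyshev-adjacency indicator
theorem pv_pointwise (s d : Int × Int) :
    pvCOORDINATES.countP (fun c => decide ((s.1 + c.1, s.2 + c.2) = d))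
      = if s ≠ d ∧ (s.1 - d.1).natAbs ≤ 1 ∧ (s.2 - d.2).natAbs ≤ 1 then 1 else 0 := by
  obtain ⟨sx, sy⟩ := s
  obtain ⟨dx, dy⟩ := d
  simp only [pvCOORDINATES, List.countP_cons, List.countP_nil, decide_eq_true_eq,
    Prod.ext_iff, ne_eq, not_and]
  split_ifs <;> omega

-- the two per-asterisk inner loops agree
theorem pv_per_asterisk (xn yn : Int) (rng : List Int) (s : Int × Int) (out : List (Int × Int)) :
    pvCOORDINATES.foldl (fun out c =>
        rng.foldl (fun out i =>
          if (s.1 + c.1, s.2 + c.2) = (xn + i, yn) then out ++ [s] else out) out) out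
      = (rng.map (fun i => (xn + i, yn))).foldl (fun out d =>
          if s ≠ d ∧ (s.1 - d.1).natAbs ≤ 1 ∧ (s.2 - d.2).natAbs ≤ 1 then out ++ [s] else out) out := by
  have hA : pvCOORDINATES.foldl (fun out c =>
        rng.foldl (fun out i =>
          if (s.1 + c.1, s.2 + c.2) = (xn + i, yn) then out ++ [s] else out) out) out
      = pvCOORDINATES.foldl (fun out c =>
          out ++ List.replicate (rng.countP fun i => decide ((s.1 + c.1, s.2 + c.2) = (xn + i, yn))) s) out := by
    apply List.foldl_ext
    intro acc c _
    exact pv_foldl_if_rep (fun i => (s.1 + c.1, s.2 + c.2) = (xn + i, yn)) s rng acc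
  rw [hA, pv_foldl_rep_sum,
    pv_foldl_if_rep (fun d => s ≠ d ∧ (s.1 - d.1).natAbs ≤ 1 ∧ (s.2 - d.2).natAbs ≤ 1) s]
  congr 1
  rw [List.countP_map]
  rw [pv_count_swap (fun c i => (s.1 + c.1, s.2 + c.2) = (xn + i, yn)) rng pvCOORDINATES]
  have : (rng.map (fun i => pvCOORDINATES.countP (fun c => decide ((s.1 + c.1, s.2 + c.2) = (xn + i, yn))))).sum
      = (rng.map (fun i => if s ≠ ((xn + i, yn) : Int × Int) ∧ (s.1 - (xn + i)).natAbs ≤ 1 ∧ (s.2 - yn).natAbs ≤ 1 then 1 else 0)).sum := by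
    apply congrArg
    apply List.map_congr_left
    intro i _
    exact pv_pointwise s (xn + i, yn)
  rw [this, pv_sum_ind (fun i => s ≠ ((xn + i, yn) : Int × Int) ∧ (s.1 - (xn + i)).natAbs ≤ 1 ∧ (s.2 - yn).natAbs ≤ 1)]
  congr 1

-- ===== VERDICT (by name: the statement is the Claim_ definition above) =====
theorem get_ajdacent_asterisks_spec : Claim_equal_get_ajdacent_asterisks := by
  intro number A _
  unfold Spec_get_ajdacent_asterisks get_ajdacent_asterisks get_ajdacent_asterisks_alt
  apply List.foldl_ext
  intro out s _
  exact pv_per_asterisk number.2.1 number.2.2 _ s out
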